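-- pv_equiv track=rewrite | github.com/axtonio/markdown_reader | markdown_reader/markdown_file.py | level_and_name
-- ===== SOURCE A (Python) =====
-- def level_and_name(row: str) -> tuple[int, str]:
--     row.strip()
--     level = 0
--     name = ""
--     for sb in row:
--         if sb == "#":
--             level += 1
--             continue
--         name = row.replace("#", "").strip()
--         break
--
--     return level, name
-- ===== SOURCE B (Python) =====
-- def level_and_name(row: str) -> tuple[int, str]:
--     # level = number of leading '#'; name never depends on where A's loop breaks
--     return len(row) - len(row.lstrip("#")), row.replace("#", "").strip()
-- ===== Notes on version B (the rewrite author's own statement) =====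
-- stated objective: simpler
-- what changed: A's explicit character loop with break/continue and mutable accumulators is replaced by a closed-form one-liner: the level is len(row) - len(row.lstrip('#')) and the name is computed unconditionally, since A's name assignment never depends on the loop position.
import Mathlib
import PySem

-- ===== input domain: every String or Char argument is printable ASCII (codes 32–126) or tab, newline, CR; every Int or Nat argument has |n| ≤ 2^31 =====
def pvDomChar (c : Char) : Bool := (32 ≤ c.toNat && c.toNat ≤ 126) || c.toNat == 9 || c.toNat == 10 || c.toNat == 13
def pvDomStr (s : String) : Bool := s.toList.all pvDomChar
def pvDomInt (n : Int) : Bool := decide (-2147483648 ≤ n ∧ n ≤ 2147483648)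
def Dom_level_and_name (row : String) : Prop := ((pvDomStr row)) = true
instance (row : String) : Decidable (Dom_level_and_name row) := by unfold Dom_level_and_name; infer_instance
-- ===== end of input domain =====

-- B replaces A's explicit character loop by a closed form: level = len(row) - len(row.lstrip('#')),
-- name computed unconditionally (A's name assignment never depends on the loop position). Objective: simpler.

-- ===== PORT A =====
-- the for-loop over row with continue/break, carrying the mutable level accumulator
def levelAndNameLoop (row : String) : List Char → Int → Int × String
  | [], level => (level, "")                  -- loop ends without break: name is still ""
  | c :: rest, level =>
    if c == '#' then levelAndNameLoop row rest (level + 1)   -- level += 1; continue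
    else (level, PySem.Str.strip (PySem.Str.replace row "#" ""))  -- name = row.replace("#","").strip(); break

def level_and_name (row : String) : Int × String :=
  -- row.strip() on its own line is a discarded no-op in A, so it is not ported
  levelAndNameLoop row row.toList 0

-- ===== PORT B =====
def level_and_name_alt (row : String) : Int × String :=
  -- row.lstrip('#') ported by hand as dropWhile (· == '#'): exact for a single strip character
  (((row.toList.length : Int) - ((row.toList.dropWhile (· == '#')).length : Int)),
   PySem.Str.strip (PySem.Str.replace row "#" ""))

-- ===== PRECONDITION & SPEC =====
def Spec_level_and_name (row : String) (out : Int × String) : Prop := out = level_and_name_alt row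
instance (row : String) (out : Int × String) : Decidable (Spec_level_and_name row out) := by unfold Spec_level_and_name; infer_instance

-- ===== CLAIM (what is proved, stated in full; the proofs are below) =====
def Claim_equal_level_and_name : Prop := ∀ (row : String), Dom_level_and_name row → Spec_level_and_name row (level_and_name row)

-- ===== LEMMAS AND PROOFS =====

-- replace's worker removes every '#' ; on an all-'#' list it yields just the reversed accumulator
lemma replace_go_all_hash (fuel : Nat) (cs acc : List Char)
    (hf : cs.length ≤ fuel) (h : ∀ c ∈ cs, c = '#') :
    PySem.Chars.replace.go ['#'] [] fuel cs acc = acc.reverse := by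
  induction cs generalizing fuel acc with
  | nil => cases fuel <;> simp [PySem.Chars.replace.go]
  | cons c t ih =>
    cases fuel with
    | zero => simp at hf
    | succ n =>
      have hc : c = '#' := h c (by simp)
      subst hc
      have : PySem.Chars.replace.go ['#'] [] (n+1) ('#' :: t) acc
           = PySem.Chars.replace.go ['#'] [] n t acc := by
        simp [PySem.Chars.replace.go, List.isPrefixOf]
      rw [this]
      exact ih n acc (by simpa using hf) (fun c hc => h c (by simp [hc]))

lemma name_all_hash (row : String) (h : ∀ c ∈ row.toList, c = '#') :
    PySem.Str.strip (PySem.Str.replace row "#" "") = "" := by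
  have hrep : PySem.Chars.replace row.toList ['#'] [] = [] := by
    simp [PySem.Chars.replace]
    exact replace_go_all_hash row.toList.length row.toList [] le_rfl h
  have : (PySem.Str.strip (PySem.Str.replace row "#" "")).toList = ([] : List Char) := by
    simp [PySem.Str.toList_strip, PySem.Str.toList_replace]
    simp [hrep, PySem.Chars.strip, PySem.Chars.lstrip, PySem.Chars.rstrip]
  exact String.toList_inj.mp (by simpa using this)

-- characterisation of A's loop
lemma levelAndNameLoop_eq (row : String) (cs : List Char) (level : Int) :
    levelAndNameLoop row cs level
      = (level + ((cs.takeWhile (· == '#')).length : Int),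
         if cs.dropWhile (· == '#') = [] then ""
         else PySem.Str.strip (PySem.Str.replace row "#" "")) := by
  induction cs generalizing level with
  | nil => simp [levelAndNameLoop]
  | cons c rest ih =>
    by_cases hc : c = '#'
    · subst hc
      simp [levelAndNameLoop, ih]
      ring
    · simp [levelAndNameLoop, hc]

-- ===== VERDICT (by name: the statement is the Claim_ definition above) =====
theorem level_and_name_spec : Claim_equal_level_and_name := by
  intro row _
  unfold Spec_level_and_name level_and_name level_and_name_alt
  rw [levelAndNameLoop_eq]
  have hlen : (row.toList.takeWhile (· == '#')).length
      + (row.toList.dropWhile (· == '#')).length = row.toList.length := by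
    rw [← List.length_append, List.takeWhile_append_dropWhile]
  refine Prod.ext ?_ ?_
  · have h2 : row.toList.length = row.length := String.length_toList
    simp only
    omega
  · simp only
    split_ifs with hd
    · have hall : ∀ c ∈ row.toList, c = '#' := by
        intro c hc
        have := List.dropWhile_eq_nil_iff.mp hd c hc
        simpa using this
      exact (name_all_hash row hall).symm
    · rfl
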